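-- pv_equiv track=rewrite | github.com/Novus-Engine/novuspack | scripts/lib/validation/_markdown.py | build_heading_hierarchy
-- ===== SOURCE A (Python) =====
-- from typing import Optional, List, Set, Tuple, Dict
--
-- def build_heading_hierarchy(
--     headings: List[Tuple[int, int, str]]  # (line_num, level, text)
-- ) -> Dict[int, Optional[int]]:
--     """
--     Build parent-child relationship mapping for headings.
--
--     Uses heading_stack approach similar to validate_heading_numbering.py.
--     Each heading finds its most recent parent at the appropriate level.
--
--     Args:
--         headings: List of (line_num, level, text) tuples, sorted by line_num
--
--     Returns:
--         Dict mapping heading index (0-based) -> parent heading index (None if no parent).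
--         If H3+ appears before H2, it has no parent (None).
--     """
--     hierarchy = {}
--     heading_stack = {}  # Maps level -> heading_index (current parent at that level)
--
--     for idx, (_line_num, level, _text) in enumerate(headings):
--         parent_index = None
--         if level > 2:
--             # H3 and beyond need a parent
--             parent_level = level - 1
--             parent_index = heading_stack.get(parent_level)
--
--         hierarchy[idx] = parent_index
--
--         # Update heading stack - set this heading as the current parent at its level
--         heading_stack[level] = idx
--
--         # Clear deeper levels when we move up in hierarchy
--         levels_to_clear = [lvl for lvl in heading_stack if lvl > level]
--         for lvl in levels_to_clear:
--             del heading_stack[lvl]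
--
--     return hierarchy
-- ===== SOURCE B (Python) =====
-- def build_heading_hierarchy(headings):
--     """Stateless brute-force re-implementation: for each heading, scan backwards
--     through the earlier headings; the parent is the nearest earlier heading whose
--     level is <= level-1, and only counts if its level is exactly level-1."""
--     levels = [lvl for _, lvl, _ in headings]
--     result = {}
--     for i, lvl in enumerate(levels):
--         parent = None
--         if lvl > 2:
--             for j in range(i - 1, -1, -1):
--                 if levels[j] <= lvl - 1:
--                     if levels[j] == lvl - 1:
--                         parent = j
--                     break
--         result[i] = parent
--     return result
-- ===== Notes on version B (the rewrite author's own statement) =====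
-- stated objective: alternative
-- what changed: Drops A's incrementally maintained level->index stack dict entirely: B is stateless and, for each heading independently, does a backward scan through the earlier headings for the nearest one at level <= level-1, accepting it as parent only if its level is exactly level-1.
import Mathlib
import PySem

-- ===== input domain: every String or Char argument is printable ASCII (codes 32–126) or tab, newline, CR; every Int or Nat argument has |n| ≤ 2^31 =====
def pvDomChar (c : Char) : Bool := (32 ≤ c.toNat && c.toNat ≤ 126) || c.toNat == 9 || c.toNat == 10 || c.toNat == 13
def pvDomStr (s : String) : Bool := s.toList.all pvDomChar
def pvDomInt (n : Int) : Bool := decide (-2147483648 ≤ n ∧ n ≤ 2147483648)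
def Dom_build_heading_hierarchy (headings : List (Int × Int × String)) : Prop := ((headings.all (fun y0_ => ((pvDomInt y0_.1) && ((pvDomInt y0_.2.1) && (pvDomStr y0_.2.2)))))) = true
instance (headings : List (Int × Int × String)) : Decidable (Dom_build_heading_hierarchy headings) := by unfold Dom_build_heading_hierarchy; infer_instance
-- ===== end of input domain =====

-- B drops A's incrementally maintained level->index dict: it computes each heading's parent
-- independently by a backward scan through the earlier headings (same return value).

-- ===== PORT A =====
-- one iteration of A's for-loop over enumerate(headings); state = (hierarchy, heading_stack)
def bhhStep (st : PySem.Dict Int (Option Int) × PySem.Dict Int Int)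
    (p : Int × (Int × Int × String)) : PySem.Dict Int (Option Int) × PySem.Dict Int Int :=
  let idx := p.1
  let level := p.2.2.1
  let parent_index : Option Int := if 2 < level then st.2.get? (level - 1) else none
  let hierarchy := st.1.insert idx parent_index
  let heading_stack := st.2.insert level idx
  let levels_to_clear := heading_stack.keys.filter (fun lvl => decide (level < lvl))
  (hierarchy, levels_to_clear.foldl (fun d lvl => d.erase lvl) heading_stack)

def build_heading_hierarchy (headings : List (Int × Int × String)) : List (Int × Option Int) :=
  ((PySem.List.enumerate headings).foldl bhhStep (PySem.Dict.empty, PySem.Dict.empty)).1.items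

-- ===== PORT B =====
-- Source B's inner `for j in range(i-1, -1, -1)` loop: `revpre` is the list of (j, levels[j])
-- for the already-processed headings, newest first — exactly the order range(i-1,-1,-1) visits
def bhhScan (t : Int) : List (Int × Int) → Option Int
  | [] => none
  | (j, lj) :: rest => if lj ≤ t then (if lj = t then some j else none) else bhhScan t rest

-- Source B's outer for-loop over enumerate(levels); the result dict has fresh keys 0,1,2,…
def bhhGoB (revpre : List (Int × Int)) (i : Int) : List Int → List (Int × Option Int)
  | [] => []
  | lvl :: rest =>
    (i, if 2 < lvl then bhhScan (lvl - 1) revpre else none)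
      :: bhhGoB ((i, lvl) :: revpre) (i + 1) rest

def build_heading_hierarchy_alt (headings : List (Int × Int × String)) : List (Int × Option Int) :=
  bhhGoB [] 0 (headings.map (fun h => h.2.1))

-- ===== PRECONDITION & SPEC =====
def Spec_build_heading_hierarchy (headings : List (Int × Int × String)) (out : List (Int × Option Int)) : Prop := out = build_heading_hierarchy_alt headings
instance (headings : List (Int × Int × String)) (out : List (Int × Option Int)) : Decidable (Spec_build_heading_hierarchy headings out) := by unfold Spec_build_heading_hierarchy; infer_instance

-- ===== CLAIM (what is proved, stated in full; the proofs are below) =====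
def Claim_equal_build_heading_hierarchy : Prop := ∀ (headings : List (Int × Int × String)), Dom_build_heading_hierarchy headings → Spec_build_heading_hierarchy headings (build_heading_hierarchy headings)

-- ===== LEMMAS AND PROOFS =====

-- find? on a list with the key-k entries filtered out
lemma find?_erase_items (l : List (Int × Int)) (k t : Int) :
    (l.filter (fun p => !p.1 == k)).find? (fun p => p.1 == t)
      = if t = k then none else l.find? (fun p => p.1 == t) := by
  induction l with
  | nil => simp
  | cons q rest ih =>
    by_cases hqk : q.1 = k
    · by_cases htk : t = k
      · subst htk; simp [hqk, ih]
      · have hkt : (k == t) = false := by simp; omega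
        simp [hqk, htk, ih, hkt]
    · by_cases hqt : q.1 = t
      · have : ¬ t = k := by omega
        simp [hqt, this]
      · simp [hqk, hqt, ih]

-- folding `erase` over a list of keys: lookup is none on those keys, unchanged elsewhere
lemma get?_foldl_erase (ks : List Int) (d : PySem.Dict Int Int) (t : Int) :
    ((ks.foldl (fun d k => d.erase k) d).get? t)
      = if t ∈ ks then none else d.get? t := by
  induction ks generalizing d with
  | nil => simp
  | cons k ks ih =>
    rw [List.foldl_cons, ih]
    have herase : (d.erase k).get? t = if t = k then none else d.get? t := by
      simp only [PySem.Dict.erase, PySem.Dict.get?, find?_erase_items]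
      split_ifs <;> rfl
    by_cases hks : t ∈ ks
    · simp [hks]
    · rw [if_neg hks, herase]
      by_cases hk : t = k <;> simp [hk, hks]

-- A's whole stack update (insert this level, delete all deeper levels), seen through get?
lemma stack_step_get? (L idx t : Int) (st : PySem.Dict Int Int) :
    ((((st.insert L idx).keys.filter (fun lvl => decide (L < lvl))).foldl
        (fun d lvl => d.erase lvl) (st.insert L idx)).get? t)
      = if L ≤ t then (if L = t then some idx else none) else st.get? t := by
  rw [get?_foldl_erase]
  rcases lt_trichotomy t L with h | h | h
  · have hmem : t ∉ (st.insert L idx).keys.filter (fun lvl => decide (L < lvl)) := by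
      intro hmem
      have := (List.mem_filter.mp hmem).2
      simp at this; omega
    rw [if_neg hmem, if_neg (by omega)]
    rw [PySem.Dict.get?_insert]; rw [if_neg (by omega)]
  · subst h
    have hmem : t ∉ (st.insert t idx).keys.filter (fun lvl => decide (t < lvl)) := by
      intro hmem
      have := (List.mem_filter.mp hmem).2
      simp at this
    rw [if_neg hmem, if_pos (le_refl t), if_pos rfl]
    rw [PySem.Dict.get?_insert]; rw [if_pos rfl]
  · by_cases hk : t ∈ (st.insert L idx).keys
    · have hmem : t ∈ (st.insert L idx).keys.filter (fun lvl => decide (L < lvl)) :=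
        List.mem_filter.mpr ⟨hk, by simp; omega⟩
      rw [if_pos hmem, if_pos (by omega), if_neg (by omega)]
    · have hmem : t ∉ (st.insert L idx).keys.filter (fun lvl => decide (L < lvl)) := by
        intro hmem; exact hk (List.mem_filter.mp hmem).1
      rw [if_neg hmem, if_pos (by omega), if_neg (by omega)]
      exact (PySem.Dict.get?_eq_none_iff_not_mem_keys _ _).mpr hk

-- main loop invariant: if the stack dict's lookups agree with B's backward scan over the
-- already-seen headings, A's fold emits hd.items ++ B's remaining output
lemma bhh_main (hs : List (Int × Int × String)) :
    ∀ (idx : Int) (hd : PySem.Dict Int (Option Int)) (st : PySem.Dict Int Int)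
      (revpre : List (Int × Int)),
    (∀ k ∈ hd.keys, k < idx) →
    (∀ t, st.get? t = bhhScan t revpre) →
    ((PySem.List.enumerate hs idx).foldl bhhStep (hd, st)).1.items
      = hd.items ++ bhhGoB revpre idx (hs.map (fun h => h.2.1)) := by
  induction hs with
  | nil => intro idx hd st revpre _ _; simp [PySem.List.enumerate, bhhGoB]
  | cons hhd rest ih =>
    intro idx hd st revpre hkeys hscan
    obtain ⟨ln, L, tx⟩ := hhd
    have henum : PySem.List.enumerate ((ln, L, tx) :: rest) idx
        = (idx, (ln, L, tx)) :: PySem.List.enumerate rest (idx + 1) := rfl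
    set parentB : Option Int := if 2 < L then bhhScan (L - 1) revpre else none with hparentB
    have hstep : bhhStep (hd, st) (idx, (ln, L, tx))
        = (hd.insert idx parentB,
           (((st.insert L idx).keys.filter (fun lvl => decide (L < lvl))).foldl
             (fun d lvl => d.erase lvl) (st.insert L idx))) := by
      simp only [bhhStep]
      rw [hscan (L - 1)]
    have hscan' : ∀ t,
        ((((st.insert L idx).keys.filter (fun lvl => decide (L < lvl))).foldl
            (fun d lvl => d.erase lvl) (st.insert L idx)).get? t)
          = bhhScan t ((idx, L) :: revpre) := by
      intro t
      rw [stack_step_get?]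
      simp only [bhhScan]
      by_cases h1 : L ≤ t
      · by_cases h2 : L = t <;> simp [h1, h2]
      · simp [h1, hscan]
    have hfresh : hd.contains idx = false := by
      by_contra hcon
      have : hd.contains idx = true := by simpa using hcon
      have := hkeys idx ((PySem.Dict.contains_iff_mem_keys hd idx).mp this)
      omega
    have hkeys' : ∀ k ∈ (hd.insert idx parentB).keys, k < idx + 1 := by
      intro k hk
      rcases (PySem.Dict.mem_keys_insert hd idx k parentB).mp hk with hk | hk
      · omega
      · have := hkeys k hk; omega
    rw [henum, List.foldl_cons, hstep,
      ih (idx + 1) (hd.insert idx parentB) _ ((idx, L) :: revpre) hkeys' hscan',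
      PySem.Dict.items_insert_of_not_contains hd parentB hfresh]
    simp [bhhGoB, hparentB]

-- ===== VERDICT (by name: the statement is the Claim_ definition above) =====
theorem build_heading_hierarchy_spec : Claim_equal_build_heading_hierarchy := by
  intro headings _
  show build_heading_hierarchy headings = build_heading_hierarchy_alt headings
  have := bhh_main headings 0 PySem.Dict.empty PySem.Dict.empty []
    (by simp [PySem.Dict.keys, PySem.Dict.empty])
    (by intro t; simp [PySem.Dict.get?, PySem.Dict.empty, bhhScan])
  simpa [build_heading_hierarchy, build_heading_hierarchy_alt, PySem.Dict.empty] using this
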